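-- pv_equiv track=rewrite | github.com/cosmologicon/grf | grf.py | poly_within_grid
-- ===== SOURCE A (Python) =====
-- def _split_poly(poly):
-- 	if poly and not isinstance(poly[0], tuple):
-- 		return poly[0], poly[1:]
-- 	return None, poly
--
-- def _join_poly(name, poly):
-- 	return poly if name is None else (name,) + poly
--
-- def _shift_poly(poly, dx, dy):
-- 	name, poly = _split_poly(poly)
-- 	poly = tuple((x + dx, y + dy) for x, y in poly)
-- 	return _join_poly(name, poly)
--
-- def _align_poly(poly):
-- 	name, poly = _split_poly(poly)
-- 	if poly:
-- 		xs, ys = zip(*poly)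
-- 		poly = _shift_poly(poly, -min(xs), -min(ys))
-- 	return _join_poly(name, poly)
--
-- def poly_within_grid(poly, grid, rotate=True, flip=False):
-- 	label, poly = _split_poly(poly)
-- 	orientations = [poly]
-- 	if flip:
-- 		orientations += [tuple((-x, y) for x, y in poly)]
-- 	if rotate:
-- 		orientations += [tuple((-x, -y) for x, y in p) for p in orientations]
-- 		orientations += [tuple((y, -x) for x, y in p) for p in orientations]
-- 	orientations = sorted(set(_align_poly(p) for p in orientations))
-- 	polys = set()
-- 	grid = set(grid)
-- 	for p0 in orientations:
-- 		x0, y0 = p0[0]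
-- 		for x, y in grid:
-- 			p = _shift_poly(p0, x - x0, y - y0)
-- 			if set(p) <= grid:
-- 				polys.add(p)
-- 	return [_join_poly(label, p) for p in sorted(polys)]
-- ===== SOURCE B (Python) =====
-- def poly_within_grid(poly, grid, rotate=True, flip=False):
-- 	if poly and not isinstance(poly[0], tuple):
-- 		label, cells = poly[0], tuple(poly[1:])
-- 	else:
-- 		label, cells = None, tuple(poly)
-- 	if rotate and flip:
-- 		transforms = [lambda x, y: (x, y), lambda x, y: (-x, y),
-- 			lambda x, y: (-x, -y), lambda x, y: (x, -y),
-- 			lambda x, y: (y, -x), lambda x, y: (y, x),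
-- 			lambda x, y: (-y, x), lambda x, y: (-y, -x)]
-- 	elif rotate:
-- 		transforms = [lambda x, y: (x, y), lambda x, y: (-x, -y),
-- 			lambda x, y: (y, -x), lambda x, y: (-y, x)]
-- 	elif flip:
-- 		transforms = [lambda x, y: (x, y), lambda x, y: (-x, y)]
-- 	else:
-- 		transforms = [lambda x, y: (x, y)]
-- 	orientations = set()
-- 	for t in transforms:
-- 		q = tuple(t(x, y) for x, y in cells)
-- 		if q:
-- 			mx = min(x for x, y in q)
-- 			my = min(y for x, y in q)
-- 			q = tuple((x - mx, y - my) for x, y in q)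
-- 		orientations.add(q)
-- 	gridset = set(grid)
-- 	placements = set()
-- 	for p0 in orientations:
-- 		pts = set(p0)
-- 		counts = {}
-- 		for gx, gy in gridset:
-- 			for px, py in pts:
-- 				d = (gx - px, gy - py)
-- 				counts[d] = counts.get(d, 0) + 1
-- 		for (dx, dy), c in counts.items():
-- 			if c == len(pts):
-- 				placements.add(tuple((x + dx, y + dy) for x, y in p0))
-- 	out = sorted(placements)
-- 	return out if label is None else [(label,) + p for p in out]
-- ===== Notes on version B (the rewrite author's own statement) =====
-- stated objective: alternative
-- what changed: B generates orientations from an explicit per-flag table of the 8/4/2/1 coordinate transforms instead of A's staged list-doubling, and replaces A's per-grid-cell shift-and-subset test by counting, in one dict pass over all (grid cell, poly cell) difference vectors, how many distinct poly cells each translation covers: a translation is valid iff its count equals the number of distinct poly cells.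
import Mathlib
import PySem

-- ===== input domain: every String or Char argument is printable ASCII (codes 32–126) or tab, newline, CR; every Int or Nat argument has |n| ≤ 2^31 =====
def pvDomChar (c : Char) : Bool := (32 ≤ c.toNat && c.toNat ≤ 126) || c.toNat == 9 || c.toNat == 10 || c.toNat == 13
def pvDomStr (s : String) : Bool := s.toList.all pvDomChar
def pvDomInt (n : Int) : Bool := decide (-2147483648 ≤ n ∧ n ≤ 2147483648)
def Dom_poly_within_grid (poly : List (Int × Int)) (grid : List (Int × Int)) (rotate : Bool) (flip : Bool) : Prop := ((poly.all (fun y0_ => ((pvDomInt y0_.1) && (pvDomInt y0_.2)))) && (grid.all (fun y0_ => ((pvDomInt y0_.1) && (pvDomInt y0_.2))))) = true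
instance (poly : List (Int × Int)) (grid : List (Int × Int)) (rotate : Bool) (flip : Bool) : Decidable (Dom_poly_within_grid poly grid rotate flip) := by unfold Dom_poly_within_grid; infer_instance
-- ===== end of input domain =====

-- B builds orientations from an explicit transform table and finds valid translations by
-- counting difference vectors in a dict, instead of A's per-cell shift-and-subset scan
-- (objective: alternative algorithm, same exact results).
-- For typed List (Int × Int) inputs the 'name'/'label' of _split_poly is always None and
-- _join_poly is the identity, so the ports drop that statically-dead bookkeeping.

-- ===== PORT A =====
-- _shift_poly (label always None on this input type)
def pvShift (p : List (Int × Int)) (dx dy : Int) : List (Int × Int) :=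
  p.map (fun q => (q.1 + dx, q.2 + dy))

-- _align_poly: 'if poly: xs, ys = zip(*poly); poly = _shift_poly(poly, -min(xs), -min(ys))'
-- (minD only evaluated on a nonempty list, where it is exactly Python's min)
def pvAlign (p : List (Int × Int)) : List (Int × Int) :=
  if p.isEmpty then p
  else pvShift p (-(PySem.List.minD (p.map Prod.fst) (fun v => v) 0))
               (-(PySem.List.minD (p.map Prod.snd) (fun v => v) 0))

-- sorted of tuples-of-pairs: Python's lexicographic order = Lean's List/Prod.Lex order, via
-- the order-isomorphic (injective) key 'map toLex'
def pvKey (l : List (Int × Int)) : List (Lex (Int × Int)) := l.map (fun q => toLex q)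

def poly_within_grid (poly : List (Int × Int)) (grid : List (Int × Int)) (rotate : Bool) (flip : Bool) : List (List (Int × Int)) :=
  let orientations : List (List (Int × Int)) := [poly]
  let orientations := if flip then orientations ++ [poly.map (fun q => (-q.1, q.2))] else orientations
  let orientations := if rotate then orientations ++ orientations.map (fun p => p.map (fun q => (-q.1, -q.2))) else orientations
  let orientations := if rotate then orientations ++ orientations.map (fun p => p.map (fun q => (q.2, -q.1))) else orientations
  let orientations := PySem.List.sorted (PySem.Set.ofList (orientations.map pvAlign)) pvKey false
  let gridset : PySem.Set (Int × Int) := PySem.Set.ofList grid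
  let polys : PySem.Set (List (Int × Int)) := orientations.foldl (fun polys p0 =>
      match PySem.List.pyGet? p0 0 with
      | none => polys   -- Python: 'x0, y0 = p0[0]' raises IndexError here; excluded by Pre_
      | some (x0, y0) =>
        gridset.foldl (fun polys g =>
          let p := pvShift p0 (g.1 - x0) (g.2 - y0)
          if PySem.Set.issubset (PySem.Set.ofList p) gridset then PySem.Set.add polys p else polys) polys)
    PySem.Set.empty
  PySem.List.sorted polys pvKey false

-- ===== PORT B =====
def poly_within_grid_alt (poly : List (Int × Int)) (grid : List (Int × Int)) (rotate : Bool) (flip : Bool) : List (List (Int × Int)) :=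
  let transforms : List (Int → Int → Int × Int) :=
    if rotate && flip then
      [fun x y => (x, y), fun x y => (-x, y), fun x y => (-x, -y), fun x y => (x, -y),
       fun x y => (y, -x), fun x y => (y, x), fun x y => (-y, x), fun x y => (-y, -x)]
    else if rotate then
      [fun x y => (x, y), fun x y => (-x, -y), fun x y => (y, -x), fun x y => (-y, x)]
    else if flip then
      [fun x y => (x, y), fun x y => (-x, y)]
    else
      [fun x y => (x, y)]
  let orientations : PySem.Set (List (Int × Int)) :=
    transforms.foldl (fun os t =>
      let q := poly.map (fun c => t c.1 c.2)
      let q := if q.isEmpty then q else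
        let mx := PySem.List.minD (q.map Prod.fst) (fun v => v) 0
        let my := PySem.List.minD (q.map Prod.snd) (fun v => v) 0
        q.map (fun c => (c.1 - mx, c.2 - my))
      PySem.Set.add os q) PySem.Set.empty
  let gridset : PySem.Set (Int × Int) := PySem.Set.ofList grid
  let placements : PySem.Set (List (Int × Int)) := orientations.foldl (fun pl p0 =>
      let pts : PySem.Set (Int × Int) := PySem.Set.ofList p0
      let diffs : List (Int × Int) := gridset.flatMap (fun g => pts.map (fun p => (g.1 - p.1, g.2 - p.2)))
      let counts : PySem.Dict (Int × Int) Int :=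
        diffs.foldl (fun d x => d.insert x (d.getD x 0 + 1)) PySem.Dict.empty
      counts.items.foldl (fun pl kc =>
        if kc.2 == (pts.length : Int) then
          PySem.Set.add pl (p0.map (fun c => (c.1 + kc.1.1, c.2 + kc.1.2)))
        else pl) pl)
    PySem.Set.empty
  PySem.List.sorted placements pvKey false

-- ===== PRECONDITION & SPEC =====
-- Pre_ excludes the empty polyomino, on which Python A raises IndexError at 'x0, y0 = p0[0]'.
def Pre_poly_within_grid (poly : List (Int × Int)) (grid : List (Int × Int)) (rotate : Bool) (flip : Bool) : Prop := poly ≠ []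
instance (poly : List (Int × Int)) (grid : List (Int × Int)) (rotate : Bool) (flip : Bool) : Decidable (Pre_poly_within_grid poly grid rotate flip) := by unfold Pre_poly_within_grid; infer_instance
def pvWitness_poly_within_grid : (List (Int × Int)) × (List (Int × Int)) × Bool × Bool :=
  ([(0, 0), (1, 0)], [(0, 0), (1, 0), (0, 1)], true, false)

def Spec_poly_within_grid (poly : List (Int × Int)) (grid : List (Int × Int)) (rotate : Bool) (flip : Bool) (out : List (List (Int × Int))) : Prop := out = poly_within_grid_alt poly grid rotate flip
instance (poly : List (Int × Int)) (grid : List (Int × Int)) (rotate : Bool) (flip : Bool) (out : List (List (Int × Int))) : Decidable (Spec_poly_within_grid poly grid rotate flip out) := by unfold Spec_poly_within_grid; infer_instance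

-- ===== CLAIM (what is proved, stated in full; the proofs are below) =====
def Claim_equal_poly_within_grid : Prop := ∀ (poly : List (Int × Int)) (grid : List (Int × Int)) (rotate : Bool) (flip : Bool), Dom_poly_within_grid poly grid rotate flip → Pre_poly_within_grid poly grid rotate flip → Spec_poly_within_grid poly grid rotate flip (poly_within_grid poly grid rotate flip)

-- ===== LEMMAS AND PROOFS =====

-- the two loop bodies, named for the proofs (definitionally the lambdas in the ports)
def pvStepA (gridset : PySem.Set (Int × Int)) (polys : PySem.Set (List (Int × Int))) (p0 : List (Int × Int)) : PySem.Set (List (Int × Int)) :=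
  match PySem.List.pyGet? p0 0 with
  | none => polys
  | some (x0, y0) =>
    gridset.foldl (fun polys g =>
      let p := pvShift p0 (g.1 - x0) (g.2 - y0)
      if PySem.Set.issubset (PySem.Set.ofList p) gridset then PySem.Set.add polys p else polys) polys

def pvStepB (gridset : PySem.Set (Int × Int)) (polys : PySem.Set (List (Int × Int))) (p0 : List (Int × Int)) : PySem.Set (List (Int × Int)) :=
  (((gridset.flatMap (fun g => (PySem.Set.ofList p0).map (fun p => (g.1 - p.1, g.2 - p.2)))).foldl
      (fun d x => d.insert x (d.getD x 0 + 1)) PySem.Dict.empty).items).foldl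
    (fun pl kc =>
      if kc.2 == ((PySem.Set.ofList p0).length : Int) then
        PySem.Set.add pl (p0.map (fun c => (c.1 + kc.1.1, c.2 + kc.1.2)))
      else pl) polys

-- what one orientation contributes (same for A and B)
def pvAdd (gridset : PySem.Set (Int × Int)) (p0 : List (Int × Int)) (q : List (Int × Int)) : Prop :=
  p0 ≠ [] ∧ ∃ dx dy : Int, (∀ pt ∈ p0, (pt.1 + dx, pt.2 + dy) ∈ gridset) ∧ q = pvShift p0 dx dy

theorem pvKey_inj : Function.Injective pvKey := by
  intro a b hh
  exact List.map_injective_iff.mpr (fun x y hxy => by simpa using congrArg ofLex hxy) hh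

theorem pv_mem_foldl_ite_add {α β : Type} [BEq α] [LawfulBEq α] (l : List β) (c : β → Bool)
    (f : β → α) (s : PySem.Set α) (q : α) :
    q ∈ l.foldl (fun s b => if c b then PySem.Set.add s (f b) else s) s
      ↔ q ∈ s ∨ ∃ b ∈ l, c b = true ∧ q = f b := by
  induction l generalizing s with
  | nil => simp
  | cons b t ih =>
    simp only [List.foldl_cons, ih, List.mem_cons]
    by_cases hc : c b = true <;> simp [hc, PySem.Set.mem_add] <;> tauto

theorem pv_nodup_foldl_ite_add {α β : Type} [BEq α] [LawfulBEq α] (l : List β) (c : β → Bool)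
    (f : β → α) (s : PySem.Set α) (hs : s.Nodup) :
    (l.foldl (fun s b => if c b then PySem.Set.add s (f b) else s) s).Nodup := by
  induction l generalizing s with
  | nil => exact hs
  | cons b t ih =>
    simp only [List.foldl_cons]
    by_cases hc : c b = true <;> simp only [hc, if_true, if_false, Bool.false_eq_true]
    · exact ih _ (PySem.Set.nodup_add _ _ hs)
    · exact ih _ hs

theorem pv_subset_iff (p0 : List (Int × Int)) (dx dy : Int) (gs : PySem.Set (Int × Int)) :
    PySem.Set.issubset (PySem.Set.ofList (pvShift p0 dx dy)) gs = true
      ↔ ∀ pt ∈ p0, (pt.1 + dx, pt.2 + dy) ∈ gs := by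
  simp only [PySem.Set.issubset_iff, PySem.Set.mem_ofList, pvShift, List.mem_map]
  constructor
  · intro h pt hpt
    exact h _ ⟨pt, hpt, rfl⟩
  · rintro h x ⟨pt, hpt, rfl⟩
    exact h pt hpt

theorem pv_mem_stepA (gs : PySem.Set (Int × Int)) (polys : PySem.Set (List (Int × Int)))
    (p0 : List (Int × Int)) (q : List (Int × Int)) :
    q ∈ pvStepA gs polys p0 ↔ q ∈ polys ∨ pvAdd gs p0 q := by
  match p0 with
  | [] => simp [pvStepA, pvAdd, PySem.List.pyGet?_zero]
  | (x0, y0) :: rest =>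
    simp only [pvStepA, PySem.List.pyGet?_zero, List.getElem?_cons_zero]
    rw [pv_mem_foldl_ite_add gs (fun g => PySem.Set.issubset (PySem.Set.ofList (pvShift ((x0, y0) :: rest) (g.1 - x0) (g.2 - y0))) gs) (fun g => pvShift ((x0, y0) :: rest) (g.1 - x0) (g.2 - y0)) polys q]
    constructor
    · rintro (h | ⟨g, hg, hsub, rfl⟩)
      · exact Or.inl h
      · refine Or.inr ⟨by simp, g.1 - x0, g.2 - y0, (pv_subset_iff _ _ _ _).mp hsub, rfl⟩
    · rintro (h | ⟨-, dx, dy, hall, rfl⟩)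
      · exact Or.inl h
      · have h1 : (x0 + dx, y0 + dy).1 - x0 = dx := by simp
        have h2 : (x0 + dx, y0 + dy).2 - y0 = dy := by simp
        refine Or.inr ⟨(x0 + dx, y0 + dy), hall (x0, y0) (by simp), ?_, ?_⟩ <;> rw [h1, h2]
        exact (pv_subset_iff _ _ _ _).mpr hall

-- counting: how many times a difference vector occurs among all (grid cell − poly cell) pairs
theorem pv_count_diffs (G P : List (Int × Int)) (hP : P.Nodup) (d : Int × Int) :
    (G.flatMap (fun g => P.map (fun p => (g.1 - p.1, g.2 - p.2)))).count d
      = G.countP (fun g => decide ((g.1 - d.1, g.2 - d.2) ∈ P)) := by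
  induction G with
  | nil => simp
  | cons g t ih =>
    rw [List.flatMap_cons, List.count_append, ih, List.countP_cons]
    have hmap : (P.map (fun p => (g.1 - p.1, g.2 - p.2))).count d
        = if (g.1 - d.1, g.2 - d.2) ∈ P then 1 else 0 := by
      rw [List.count_eq_countP, List.countP_map]
      have hpt : ∀ p ∈ P, (((· == d) ∘ fun p => (g.1 - p.1, g.2 - p.2)) p = true
          ↔ (p == (g.1 - d.1, g.2 - d.2)) = true) := by
        intro p _
        simp only [Function.comp, beq_iff_eq, Prod.ext_iff]
        constructor
        · rintro ⟨h1, h2⟩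
          exact ⟨by omega, by omega⟩
        · rintro ⟨h1, h2⟩
          exact ⟨by omega, by omega⟩
      rw [List.countP_congr hpt, ← List.count_eq_countP]
      by_cases hm : (g.1 - d.1, g.2 - d.2) ∈ P
      · rw [if_pos hm]
        exact List.count_eq_one_of_mem hP hm
      · rw [if_neg hm]
        exact List.count_eq_zero_of_not_mem hm
    rw [hmap]
    by_cases hm : (g.1 - d.1, g.2 - d.2) ∈ P <;> simp [hm, Nat.add_comm]

-- change of variable g ↦ g − d between the two filtered counts
theorem pv_count_flip (G P : List (Int × Int)) (hG : G.Nodup) (hP : P.Nodup) (d : Int × Int) :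
    G.countP (fun g => decide ((g.1 - d.1, g.2 - d.2) ∈ P))
      = P.countP (fun p => decide ((p.1 + d.1, p.2 + d.2) ∈ G)) := by
  rw [List.countP_eq_length_filter, List.countP_eq_length_filter]
  have hperm : ((G.filter (fun g => decide ((g.1 - d.1, g.2 - d.2) ∈ P))).map
      (fun g => (g.1 - d.1, g.2 - d.2))).Perm
      (P.filter (fun p => decide ((p.1 + d.1, p.2 + d.2) ∈ G))) := by
    apply (List.perm_ext_iff_of_nodup ?_ ?_).mpr
    · intro x
      simp only [List.mem_map, List.mem_filter, decide_eq_true_eq]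
      constructor
      · rintro ⟨g, ⟨hgG, hgP⟩, rfl⟩
        refine ⟨hgP, ?_⟩
        have : (g.1 - d.1 + d.1, g.2 - d.2 + d.2) = g := by cases g; simp
        rwa [this]
      · rintro ⟨hxP, hxG⟩
        refine ⟨(x.1 + d.1, x.2 + d.2), ⟨hxG, ?_⟩, by cases x; simp⟩
        simpa using (by cases x; simpa using hxP : (x.1 + d.1 - d.1, x.2 + d.2 - d.2) ∈ P)
    · apply List.Nodup.map ?_ (hG.filter _)
      intro a b hab
      have h1 := congrArg Prod.fst hab
      have h2 := congrArg Prod.snd hab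
      simp at h1 h2
      cases a; cases b; simp_all
    · exact hP.filter _
  calc (G.filter (fun g => decide ((g.1 - d.1, g.2 - d.2) ∈ P))).length
      = ((G.filter (fun g => decide ((g.1 - d.1, g.2 - d.2) ∈ P))).map
          (fun g => (g.1 - d.1, g.2 - d.2))).length := by rw [List.length_map]
    _ = (P.filter (fun p => decide ((p.1 + d.1, p.2 + d.2) ∈ G))).length := hperm.length_eq

theorem pv_mem_stepB (gs : PySem.Set (Int × Int)) (polys : PySem.Set (List (Int × Int)))
    (p0 : List (Int × Int)) (q : List (Int × Int)) (hGnd : gs.Nodup) :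
    q ∈ pvStepB gs polys p0 ↔ q ∈ polys ∨ pvAdd gs p0 q := by
  unfold pvStepB
  rw [PySem.Dict.foldl_insert_getD_add_one_eq_counter, PySem.Dict.items_counter]
  set P : List (Int × Int) := PySem.Set.ofList p0 with hPdef
  have hPnd : P.Nodup := PySem.Set.nodup_ofList p0
  have hPmem : ∀ x, x ∈ P ↔ x ∈ p0 := fun x => PySem.Set.mem_ofList p0 x
  set diffs : List (Int × Int) := gs.flatMap (fun g => P.map (fun p => (g.1 - p.1, g.2 - p.2))) with hdiffs
  rw [pv_mem_foldl_ite_add]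
  constructor
  · rintro (h | ⟨kc, hkc, hcnt, rfl⟩)
    · exact Or.inl h
    · rw [List.mem_map] at hkc
      obtain ⟨d, hd, rfl⟩ := hkc
      rw [PySem.Set.mem_ofList] at hd
      -- the count equality
      have hcnt' : diffs.count d = P.length := by
        have h2 : ((diffs.count d : Int)) = (P.length : Int) := by
          have := hcnt
          simp only [beq_iff_eq] at this
          exact this
        exact_mod_cast h2
      have hall : ∀ pt ∈ p0, (pt.1 + d.1, pt.2 + d.2) ∈ gs := by
        intro pt hpt
        have hc := hcnt'
        rw [pv_count_diffs gs P hPnd d, pv_count_flip gs P hGnd hPnd d] at hc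
        have hle := List.countP_eq_length.mp hc
        have := hle pt ((hPmem pt).mpr hpt)
        simpa using this
      have hne : p0 ≠ [] := by
        rcases List.mem_flatMap.mp hd with ⟨g, _, hg⟩
        rcases List.mem_map.mp hg with ⟨p, hp, _⟩
        intro hnil
        rw [hnil] at hPmem
        exact absurd ((hPmem p).mp hp) (by simp)
      exact Or.inr ⟨hne, d.1, d.2, hall, rfl⟩
  · rintro (h | ⟨hne, dx, dy, hall, rfl⟩)
    · exact Or.inl h
    · refine Or.inr ⟨((dx, dy), (diffs.count (dx, dy) : Int)), ?_, ?_, rfl⟩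
      · rw [List.mem_map]
        refine ⟨(dx, dy), ?_, rfl⟩
        rw [PySem.Set.mem_ofList]
        obtain ⟨p1, hp1⟩ : ∃ p1, p1 ∈ p0 := by
          cases p0 with
          | nil => exact absurd rfl hne
          | cons a t => exact ⟨a, by simp⟩
        apply List.mem_flatMap.mpr
        refine ⟨(p1.1 + dx, p1.2 + dy), hall p1 hp1, ?_⟩
        apply List.mem_map.mpr
        exact ⟨p1, (hPmem p1).mpr hp1, by cases p1; simp⟩
      · have : diffs.count (dx, dy) = P.length := by
          rw [pv_count_diffs gs P hPnd _, pv_count_flip gs P hGnd hPnd _]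
          apply List.countP_eq_length.mpr
          intro p hp
          simpa using hall p ((hPmem p).mp hp)
        simp [this]

theorem pv_nodup_stepA (gs : PySem.Set (Int × Int)) (polys : PySem.Set (List (Int × Int)))
    (p0 : List (Int × Int)) (h : polys.Nodup) : (pvStepA gs polys p0).Nodup := by
  unfold pvStepA
  cases PySem.List.pyGet? p0 0 with
  | none => exact h
  | some a =>
    obtain ⟨x0, y0⟩ := a
    exact pv_nodup_foldl_ite_add gs _ _ polys h

theorem pv_nodup_stepB (gs : PySem.Set (Int × Int)) (polys : PySem.Set (List (Int × Int)))
    (p0 : List (Int × Int)) (h : polys.Nodup) : (pvStepB gs polys p0).Nodup := by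
  unfold pvStepB
  exact pv_nodup_foldl_ite_add _ _ _ polys h

theorem pv_mem_foldl_step (step : PySem.Set (List (Int × Int)) → List (Int × Int) → PySem.Set (List (Int × Int)))
    (P : List (Int × Int) → List (Int × Int) → Prop)
    (hmem : ∀ s p0 q, q ∈ step s p0 ↔ q ∈ s ∨ P p0 q)
    (l : List (List (Int × Int))) (s : PySem.Set (List (Int × Int))) (q : List (Int × Int)) :
    q ∈ l.foldl step s ↔ q ∈ s ∨ ∃ p0 ∈ l, P p0 q := by
  induction l generalizing s with
  | nil => simp
  | cons p0 t ih =>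
    simp only [List.foldl_cons, ih, hmem, List.mem_cons]
    aesop

theorem pv_nodup_foldl_step (step : PySem.Set (List (Int × Int)) → List (Int × Int) → PySem.Set (List (Int × Int)))
    (hstep : ∀ s p0, s.Nodup → (step s p0).Nodup)
    (l : List (List (Int × Int))) (s : PySem.Set (List (Int × Int))) (hs : s.Nodup) :
    (l.foldl step s).Nodup := by
  induction l generalizing s with
  | nil => exact hs
  | cons p0 t ih => exact ih _ (hstep _ _ hs)

-- the two final results coincide as soon as the two orientation lists have the same members
theorem pv_final (O1 O2 : List (List (Int × Int))) (hO : ∀ p, p ∈ O1 ↔ p ∈ O2)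
    (gs : PySem.Set (Int × Int)) (hG : gs.Nodup) :
    PySem.List.sorted (O1.foldl (pvStepA gs) PySem.Set.empty) pvKey false
      = PySem.List.sorted (O2.foldl (pvStepB gs) PySem.Set.empty) pvKey false := by
  have e : (fun (a b : List (Lex (Int × Int))) => a.decidableLT b)
      = (LinearOrder.toDecidableLT : DecidableLT (List (Lex (Int × Int)))) := by
    funext a b; exact Subsingleton.elim _ _
  rw [show (fun (a b : List (Lex (Int × Int))) => a.decidableLT b) = _ from e]
  apply PySem.List.sorted_eq_sorted_of_perm _ _ pvKey pvKey_inj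
  apply (List.perm_ext_iff_of_nodup ?_ ?_).mpr
  · intro q
    rw [pv_mem_foldl_step _ _ (pv_mem_stepA gs), pv_mem_foldl_step _ _ (fun s p0 q => pv_mem_stepB gs s p0 q hG)]
    simp only [hO]
  · exact pv_nodup_foldl_step _ (pv_nodup_stepA gs) O1 _ (by simp [PySem.Set.empty])
  · exact pv_nodup_foldl_step _ (pv_nodup_stepB gs) O2 _ (by simp [PySem.Set.empty])

-- proof-side names for B's transform table and per-transform aligned orientation
def pvTransforms (rotate : Bool) (flip : Bool) : List (Int → Int → Int × Int) :=
  if rotate && flip then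
    [fun x y => (x, y), fun x y => (-x, y), fun x y => (-x, -y), fun x y => (x, -y),
     fun x y => (y, -x), fun x y => (y, x), fun x y => (-y, x), fun x y => (-y, -x)]
  else if rotate then
    [fun x y => (x, y), fun x y => (-x, -y), fun x y => (y, -x), fun x y => (-y, x)]
  else if flip then
    [fun x y => (x, y), fun x y => (-x, y)]
  else
    [fun x y => (x, y)]

def pvOrientB (poly : List (Int × Int)) (t : Int → Int → Int × Int) : List (Int × Int) :=
  let q := poly.map (fun c => t c.1 c.2)
  if q.isEmpty then q else
    q.map (fun c => (c.1 - PySem.List.minD (q.map Prod.fst) (fun v => v) 0,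
                     c.2 - PySem.List.minD (q.map Prod.snd) (fun v => v) 0))

-- A's staged orientation list, aligned (named so the lets in the port are shared by rfl)
def pvLA (poly : List (Int × Int)) (rotate flip : Bool) : List (List (Int × Int)) :=
  let o : List (List (Int × Int)) := [poly]
  let o := if flip then o ++ [poly.map (fun q => (-q.1, q.2))] else o
  let o := if rotate then o ++ o.map (fun p => p.map (fun q => (-q.1, -q.2))) else o
  let o := if rotate then o ++ o.map (fun p => p.map (fun q => (q.2, -q.1))) else o
  o.map pvAlign

theorem pv_align_eq' (poly : List (Int × Int)) (t : Int → Int → Int × Int) :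
    pvAlign (poly.map (fun c => t c.1 c.2)) = pvOrientB poly t := by
  by_cases hq : (poly.map (fun c => t c.1 c.2)).isEmpty
  · simp only [pvAlign, pvOrientB, hq, if_true]
  · simp only [pvAlign, pvOrientB, pvShift, hq, if_false, Bool.false_eq_true, sub_eq_add_neg]

theorem pv_align_id (poly : List (Int × Int)) :
    pvAlign poly = pvOrientB poly (fun x y => (x, y)) := by
  have hp : pvAlign poly = pvAlign (poly.map (fun c => ((fun (x y : Int) => (x, y)) c.1 c.2))) := by
    simp
  rw [hp, pv_align_eq']

-- A's staged orientation list, aligned, is exactly B's transform table applied to poly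
theorem pv_orient_eq (poly : List (Int × Int)) (rotate flip : Bool) :
    pvLA poly rotate flip = (pvTransforms rotate flip).map (pvOrientB poly) := by
  cases rotate with
  | false =>
    cases flip with
    | false =>
      simp only [pvLA, pvTransforms, Bool.and_self, Bool.and_true, Bool.and_false,
        Bool.true_and, Bool.false_and, if_true, if_false, Bool.false_eq_true, ite_true,
        ite_false, List.map_cons, List.map_nil, List.map_append, List.map_map,
        List.cons_append, List.nil_append, Function.comp_def, neg_neg]
      rw [pv_align_id poly]
    | true =>
      simp only [pvLA, pvTransforms, Bool.and_self, Bool.and_true, Bool.and_false,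
        Bool.true_and, Bool.false_and, if_true, if_false, Bool.false_eq_true, ite_true,
        ite_false, List.map_cons, List.map_nil, List.map_append, List.map_map,
        List.cons_append, List.nil_append, Function.comp_def, neg_neg]
      rw [pv_align_id poly, pv_align_eq' poly (fun x y => (-x, y))]
  | true =>
    cases flip with
    | false =>
      simp only [pvLA, pvTransforms, Bool.and_self, Bool.and_true, Bool.and_false,
        Bool.true_and, Bool.false_and, if_true, if_false, Bool.false_eq_true, ite_true,
        ite_false, List.map_cons, List.map_nil, List.map_append, List.map_map,
        List.cons_append, List.nil_append, Function.comp_def, neg_neg]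
      rw [pv_align_id poly,
          pv_align_eq' poly (fun x y => (-x, -y)),
          pv_align_eq' poly (fun x y => (y, -x)),
          pv_align_eq' poly (fun x y => (-y, x))]
    | true =>
      simp only [pvLA, pvTransforms, Bool.and_self, Bool.and_true, Bool.and_false,
        Bool.true_and, Bool.false_and, if_true, if_false, Bool.false_eq_true, ite_true,
        ite_false, List.map_cons, List.map_nil, List.map_append, List.map_map,
        List.cons_append, List.nil_append, Function.comp_def, neg_neg]
      rw [pv_align_id poly,
          pv_align_eq' poly (fun x y => (-x, y)),
          pv_align_eq' poly (fun x y => (-x, -y)),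
          pv_align_eq' poly (fun x y => (x, -y)),
          pv_align_eq' poly (fun x y => (y, -x)),
          pv_align_eq' poly (fun x y => (y, x)),
          pv_align_eq' poly (fun x y => (-y, x)),
          pv_align_eq' poly (fun x y => (-y, -x))]

theorem pv_foldl_add_map {α β : Type} [BEq α] [LawfulBEq α] (l : List β) (F : β → α) :
    l.foldl (fun s x => PySem.Set.add s (F x)) PySem.Set.empty = PySem.Set.ofList (l.map F) := by
  rw [PySem.Set.ofList_eq_foldl, List.foldl_map]
  rfl

-- ===== VERDICT (by name: the statement is the Claim_ definition above) =====
theorem poly_within_grid_spec : Claim_equal_poly_within_grid := by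
  intro poly grid rotate flip _ _
  unfold Spec_poly_within_grid
  have h1 : poly_within_grid poly grid rotate flip
      = PySem.List.sorted
          ((PySem.List.sorted (PySem.Set.ofList (pvLA poly rotate flip)) pvKey false).foldl
            (pvStepA (PySem.Set.ofList grid)) PySem.Set.empty) pvKey false := rfl
  have h2 : poly_within_grid_alt poly grid rotate flip
      = PySem.List.sorted
          (((pvTransforms rotate flip).foldl
              (fun os t => PySem.Set.add os (pvOrientB poly t)) PySem.Set.empty).foldl
            (pvStepB (PySem.Set.ofList grid)) PySem.Set.empty) pvKey false := rfl
  rw [h1, h2, pv_foldl_add_map]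
  exact pv_final _ _
    (fun p => by rw [PySem.List.mem_sorted, pv_orient_eq]) _ (PySem.Set.nodup_ofList grid)
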